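-- pv_equiv track=rewrite | github.com/CoodeCrafters/Office | server6.py | extract_shipper_and_consignee
-- ===== SOURCE A (Python) =====
-- BASE_NAMES = {"D H TRADING GROUP SPC CO", "DUBAI HOLDING GROUP - INDITEX PROJECT", "INDITEX S.A."}
--
-- def extract_shipper_and_consignee(lines):
--     """ Extracts shipper and consignee names correctly using base names. """
--     shipper, consignee = "N/A", "N/A"
--
--     for i, line in enumerate(lines):
--         if "SHIPPER CONSIGNEE" in line:
--             if i + 1 < len(lines):  # Ensure there's a next line
--                 next_line = lines[i + 1].split(": ", 1)[1]  # Remove line number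
--                 parts = next_line.split()
--
--                 # Start searching from the **rightmost side** for a base match
--                 for idx in range(len(parts), 0, -1):
--                     possible_consignee = " ".join(parts[idx - 1:])
--                     if possible_consignee in BASE_NAMES:
--                         consignee = possible_consignee
--                         shipper = " ".join(parts[:idx - 1])
--                         break
--
--                 # If consignee is still "N/A", assume entire line is shipper
--                 if consignee == "N/A":
--                     shipper = next_line
--
--             break  # Exit loop after finding the first occurrence
--
--     return shipper.strip(), consignee.strip()
-- ===== SOURCE B (Python) =====
-- BASE_NAMES = {"D H TRADING GROUP SPC CO", "DUBAI HOLDING GROUP - INDITEX PROJECT", "INDITEX S.A."}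
--
-- # The only suffix lengths (in tokens) a base name can have; tokens from split()
-- # are whitespace-free, so a joined suffix of any other length can never be a base name.
-- _SUFFIX_LENS = sorted({len(name.split()) for name in BASE_NAMES})
--
-- def extract_shipper_and_consignee(lines):
--     """ Extracts shipper and consignee names correctly using base names. """
--     idx = next((i for i, line in enumerate(lines) if "SHIPPER CONSIGNEE" in line), None)
--     if idx is None or idx + 1 >= len(lines):
--         return "N/A", "N/A"
--     next_line = lines[idx + 1].split(": ", 1)[1]  # Remove line number
--     parts = next_line.split()
--     for n in _SUFFIX_LENS:  # ascending = shortest matching suffix wins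
--         if n <= len(parts):
--             cand = " ".join(parts[len(parts) - n:])
--             if cand in BASE_NAMES:
--                 return " ".join(parts[:len(parts) - n]).strip(), cand
--     return next_line.strip(), "N/A"
-- ===== Notes on version B (the rewrite author's own statement) =====
-- stated objective: simpler
-- what changed: B replaces A's inner scan over every suffix length of the line with a test of only the (precomputed, sorted) token counts that actually occur in BASE_NAMES, and replaces A's index-carrying outer loop by a single first-index search, returning early instead of mutating shipper/consignee state.
import Mathlib
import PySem

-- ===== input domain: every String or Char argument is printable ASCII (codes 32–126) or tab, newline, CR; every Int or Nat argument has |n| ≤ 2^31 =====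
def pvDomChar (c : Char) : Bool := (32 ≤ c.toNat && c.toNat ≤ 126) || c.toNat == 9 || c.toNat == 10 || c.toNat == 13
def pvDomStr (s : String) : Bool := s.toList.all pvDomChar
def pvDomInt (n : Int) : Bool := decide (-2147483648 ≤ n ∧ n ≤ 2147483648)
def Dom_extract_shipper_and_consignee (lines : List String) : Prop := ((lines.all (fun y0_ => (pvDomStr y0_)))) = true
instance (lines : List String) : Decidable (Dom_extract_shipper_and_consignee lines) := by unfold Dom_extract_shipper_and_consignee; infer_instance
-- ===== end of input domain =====

-- B replaces A's scan over EVERY suffix length of the line with a test of only the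
-- (precomputed, sorted) token counts actually occurring in BASE_NAMES, and finds the
-- marker line with a single findIdx?-style search; objective: simpler.

-- ===== PORT A =====
def pvBaseNames : PySem.Set String :=
  PySem.Set.ofList ["D H TRADING GROUP SPC CO", "DUBAI HOLDING GROUP - INDITEX PROJECT", "INDITEX S.A."]

-- for idx in range(len(parts), 0, -1): idx counts down; parts[idx-1:] = drop (idx-1), parts[:idx-1] = take (idx-1)
def pvAInner (parts : List String) : Nat → Option (String × String)
  | 0 => none
  | Nat.succ k =>
    let possible_consignee := PySem.Str.join " " (parts.drop k)
    if PySem.Set.contains pvBaseNames possible_consignee then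
      some (PySem.Str.join " " (parts.take k), possible_consignee)   -- break with (shipper, consignee)
    else pvAInner parts k

-- the body run when "SHIPPER CONSIGNEE" is found in lines[i]
def pvABody (lines : List String) (i : Nat) : String × String :=
  if i + 1 < lines.length then
    match PySem.List.pyGet? ((PySem.Str.splitMax? (lines.getD (i+1) "") ": " 1).getD []) 1 with
    | none => ("N/A", "N/A")   -- Python raises IndexError here (no ": " in the line); excluded by Pre_
    | some next_line =>
      let parts := PySem.Str.split₀ next_line
      let sc := (pvAInner parts parts.length).getD ("N/A", "N/A")
      if sc.2 == "N/A" then (next_line, sc.2) else sc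
  else ("N/A", "N/A")

def pvALoop (all : List String) : Nat → List String → String × String
  | _, [] => ("N/A", "N/A")
  | i, line :: rest =>
    if PySem.Str.isIn "SHIPPER CONSIGNEE" line then pvABody all i
    else pvALoop all (i+1) rest

def extract_shipper_and_consignee (lines : List String) : String × String :=
  let sc := pvALoop lines 0 lines
  (PySem.Str.strip sc.1, PySem.Str.strip sc.2)

-- ===== PORT B =====
-- _SUFFIX_LENS = sorted({len(name.split()) for name in BASE_NAMES})
def pvSuffixLens : List Nat :=
  PySem.List.sorted (PySem.Set.ofList (pvBaseNames.map (fun nm => (PySem.Str.split₀ nm).length))) (fun n => n)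

-- for n in _SUFFIX_LENS: … early return; parts[len(parts)-n:] = drop (len-n), parts[:len(parts)-n] = take (len-n)
def pvBScan (parts : List String) : List Nat → Option (String × String)
  | [] => none
  | n :: ns =>
    if n ≤ parts.length then
      let cand := PySem.Str.join " " (parts.drop (parts.length - n))
      if PySem.Set.contains pvBaseNames cand then
        some (PySem.Str.strip (PySem.Str.join " " (parts.take (parts.length - n))), cand)
      else pvBScan parts ns
    else pvBScan parts ns

def extract_shipper_and_consignee_alt (lines : List String) : String × String :=
  match lines.findIdx? (fun line => PySem.Str.isIn "SHIPPER CONSIGNEE" line) with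
  | none => ("N/A", "N/A")
  | some i =>
    if i + 1 ≥ lines.length then ("N/A", "N/A")
    else
      match PySem.List.pyGet? ((PySem.Str.splitMax? (lines.getD (i+1) "") ": " 1).getD []) 1 with
      | none => ("", "")   -- Python raises IndexError here (B, like A, raises); excluded by Pre_
      | some next_line =>
        let parts := PySem.Str.split₀ next_line
        match pvBScan parts pvSuffixLens with
        | some r => r
        | none => (PySem.Str.strip next_line, "N/A")

-- ===== PRECONDITION & SPEC =====
-- Pre_ excludes exactly the inputs where Python A raises IndexError: the line after the
-- first line containing "SHIPPER CONSIGNEE" exists but does not contain ": " (B raises there too).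
def Pre_extract_shipper_and_consignee (lines : List String) : Prop :=
  (match lines.findIdx? (fun line => PySem.Str.isIn "SHIPPER CONSIGNEE" line) with
   | none => true
   | some i =>
     match lines[i+1]? with
     | none => true
     | some l => PySem.Str.isIn ": " l) = true
instance (lines : List String) : Decidable (Pre_extract_shipper_and_consignee lines) := by
  unfold Pre_extract_shipper_and_consignee; infer_instance

def pvWitness_extract_shipper_and_consignee : List String :=
  ["SHIPPER CONSIGNEE", "2: ACME CORP INDITEX S.A."]

def Spec_extract_shipper_and_consignee (lines : List String) (out : String × String) : Prop := out = extract_shipper_and_consignee_alt lines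
instance (lines : List String) (out : String × String) : Decidable (Spec_extract_shipper_and_consignee lines out) := by unfold Spec_extract_shipper_and_consignee; infer_instance

-- ===== CLAIM (what is proved, stated in full; the proofs are below) =====
def Claim_equal_extract_shipper_and_consignee : Prop := ∀ (lines : List String), Dom_extract_shipper_and_consignee lines → Pre_extract_shipper_and_consignee lines → Spec_extract_shipper_and_consignee lines (extract_shipper_and_consignee lines)

-- ===== LEMMAS AND PROOFS =====

-- proof-side view of one suffix-length test (n is the suffix length in tokens)
def pvF (parts : List String) (n : Nat) : Option (String × String) :=
  let cand := PySem.Str.join " " (parts.drop (parts.length - n))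
  if PySem.Set.contains pvBaseNames cand then
    some (PySem.Str.join " " (parts.take (parts.length - n)), cand)
  else none

-- tokens produced by Python's str.split() are nonempty and whitespace-free
theorem pv_split₀_go_tokens (s : List Char) : ∀ (cur : List Char) (acc : List (List Char)),
    (∀ c ∈ cur, PySem.Chars.isspace c = false) →
    (∀ t ∈ acc, t ≠ [] ∧ ∀ c ∈ t, PySem.Chars.isspace c = false) →
    ∀ t ∈ PySem.Chars.split₀.go s cur acc, t ≠ [] ∧ ∀ c ∈ t, PySem.Chars.isspace c = false := by
  induction s with
  | nil =>
    intro cur acc hcur hacc t ht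
    rw [PySem.Chars.split₀.go.eq_def] at ht
    by_cases h : cur.isEmpty = true
    · simp [h] at ht; exact hacc t ht
    · simp [h] at ht
      rcases ht with h1 | h1
      · exact hacc t h1
      · subst h1
        constructor
        · simp [List.isEmpty_iff] at h; simpa using h
        · intro c hc; exact hcur c (by simpa using hc)
  | cons c rest ih =>
    intro cur acc hcur hacc t ht
    rw [PySem.Chars.split₀.go.eq_def] at ht
    by_cases hsp : PySem.Chars.isspace c = true
    · by_cases h : cur.isEmpty = true
      · simp [hsp, h] at ht
        exact ih [] acc (by simp) hacc t ht
      · simp [hsp, h] at ht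
        refine ih [] (cur.reverse :: acc) (by simp) ?_ t ht
        intro u hu
        rcases List.mem_cons.mp hu with hu | hu
        · subst hu
          refine ⟨by simp [List.isEmpty_iff] at h; simpa using h, ?_⟩
          intro d hd; exact hcur d (by simpa using hd)
        · exact hacc u hu
    · simp [hsp] at ht
      refine ih (c :: cur) acc ?_ hacc t ht
      intro d hd
      rcases List.mem_cons.mp hd with hd | hd
      · subst hd; simpa using hsp
      · exact hcur d hd

theorem pv_split₀_tokens (s : String) : ∀ t ∈ PySem.Str.split₀ s, t.toList ≠ [] ∧ ' ' ∉ t.toList := by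
  intro t ht
  have h1 : t.toList ∈ PySem.Chars.split₀ s.toList := by
    rw [← PySem.Str.split₀_map_toList]
    exact List.mem_map_of_mem ht
  have h2 := pv_split₀_go_tokens s.toList [] [] (by simp) (by simp) t.toList
    (by simpa [PySem.Chars.split₀] using h1)
  refine ⟨h2.1, fun hc => ?_⟩
  have := h2.2 ' ' hc
  simp [PySem.Chars.isspace] at this

-- counting spaces in " ".join(tokens) of space-free tokens
theorem pv_join_count (l : List (List Char)) (h : ∀ t ∈ l, ' ' ∉ t) (hne : l ≠ []) :
    (PySem.Chars.join [' '] l).count ' ' = l.length - 1 := by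
  induction l with
  | nil => simp at hne
  | cons a t ih =>
    match t with
    | [] =>
      simp [PySem.Chars.join, List.intercalate]
      exact List.count_eq_zero.mpr (h a (by simp))
    | b :: t' =>
      have hstep : PySem.Chars.join [' '] (a :: b :: t') = a ++ [' '] ++ PySem.Chars.join [' '] (b :: t') := by
        simp [PySem.Chars.join, List.intercalate, List.intersperse]
      rw [hstep, List.count_append, List.count_append]
      rw [List.count_eq_zero.mpr (h a (by simp))]
      rw [ih (fun u hu => h u (by simp [hu])) (by simp)]
      simp
      omega

theorem pv_mem_base (c : String) (hc : PySem.Set.contains pvBaseNames c = true) :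
    c = "D H TRADING GROUP SPC CO" ∨ c = "DUBAI HOLDING GROUP - INDITEX PROJECT" ∨ c = "INDITEX S.A." := by
  have := (PySem.Set.contains_iff pvBaseNames c).mp hc
  rw [pvBaseNames, PySem.Set.mem_ofList] at this
  simpa using this

theorem pv_strip_base (c : String) (hc : PySem.Set.contains pvBaseNames c = true) :
    PySem.Str.strip c = c ∧ (c == "N/A") = false := by
  rcases pv_mem_base c hc with h | h | h <;> subst h <;> exact ⟨by decide, by decide⟩

-- a joined suffix of n (1 ≤ n ≤ len) split() tokens is a base name only for n = 2 or n = 6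
theorem pv_match_len (next_line : String) (n : Nat) (h1 : 1 ≤ n)
    (h2 : n ≤ (PySem.Str.split₀ next_line).length)
    (hc : PySem.Set.contains pvBaseNames
      (PySem.Str.join " " ((PySem.Str.split₀ next_line).drop ((PySem.Str.split₀ next_line).length - n))) = true) :
    n = 2 ∨ n = 6 := by
  set parts := PySem.Str.split₀ next_line with hparts
  set suf := parts.drop (parts.length - n) with hsuf
  have hlen : suf.length = n := by simp [hsuf]; omega
  have hclean : ∀ t ∈ suf.map String.toList, ' ' ∉ t := by
    intro t ht
    rcases List.mem_map.mp ht with ⟨u, hu, rfl⟩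
    exact (pv_split₀_tokens next_line u (List.mem_of_mem_drop hu)).2
  have hne : suf.map String.toList ≠ [] := by
    simp [List.map_eq_nil_iff]
    intro h; rw [h] at hlen; simp at hlen; omega
  have hcount : ((PySem.Str.join " " suf).toList).count ' ' = n - 1 := by
    rw [PySem.Str.toList_join]
    have : (" ":String).toList = [' '] := by decide
    rw [this, pv_join_count _ hclean hne]
    simp [hlen]
  rcases pv_mem_base _ hc with h | h | h <;>
    · rw [h] at hcount
      simp at hcount
      omega

-- A's countdown scan over idx is the first hit over ascending suffix lengths
theorem pv_aInner_eq (parts : List String) : ∀ idx, idx ≤ parts.length →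
    pvAInner parts idx = List.findSome? (pvF parts) (List.range' (parts.length - idx + 1) idx) := by
  intro idx
  induction idx with
  | zero => intro _; simp [pvAInner]
  | succ k ih =>
    intro hle
    have hk : parts.length - (k + 1) + 1 = parts.length - k := by omega
    rw [List.range'_succ, hk, List.findSome?_cons]
    have hfk : pvF parts (parts.length - k) =
        (if PySem.Set.contains pvBaseNames (PySem.Str.join " " (parts.drop k)) then
          some (PySem.Str.join " " (parts.take k), PySem.Str.join " " (parts.drop k)) else none) := by
      have : parts.length - (parts.length - k) = k := by omega
      simp [pvF, this]
    rw [hfk]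
    by_cases hc : PySem.Set.contains pvBaseNames (PySem.Str.join " " (parts.drop k)) = true
    · simp only [pvAInner]
      rw [if_pos hc, if_pos hc]
    · simp only [Bool.not_eq_true] at hc
      simp only [pvAInner]
      rw [if_neg (by simpa using hc), if_neg (by simpa using hc)]
      exact ih (by omega)

theorem pv_findSome?_filter {α β : Type} (f : α → Option β) (p : α → Bool) :
    ∀ ns : List α, (∀ n ∈ ns, p n = false → f n = none) →
    ns.findSome? f = (ns.filter p).findSome? f := by
  intro ns
  induction ns with
  | nil => simp
  | cons a t ih =>
    intro h
    by_cases hp : p a = true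
    · simp [List.findSome?_cons, hp]
      cases f a <;> simp [ih (fun n hn => h n (by simp [hn]))]
    · simp only [Bool.not_eq_true] at hp
      rw [List.findSome?_cons, h a (by simp) hp, List.filter_cons]
      simp [hp, ih (fun n hn => h n (by simp [hn]))]

theorem pv_filter_range' (len : Nat) :
    (List.range' 1 len).filter (fun n => n == 2 || n == 6) =
      (if 2 ≤ len then [2] else []) ++ (if 6 ≤ len then [6] else []) := by
  induction len with
  | zero => simp
  | succ k ih =>
    rw [List.range'_concat, List.filter_append, ih]
    simp only [one_mul]
    by_cases h2 : 1 + k = 2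
    · have hk : k = 1 := by omega
      subst hk; decide
    · by_cases h6 : 1 + k = 6
      · have hk : k = 5 := by omega
        subst hk; decide
      · have hcnd : ¬ ((1 + k == 2 || 1 + k == 6) = true) := by
          simp only [Bool.or_eq_true, beq_iff_eq]; omega
        rw [List.filter_cons, if_neg hcnd, List.filter_nil, List.append_nil]
        exact congrArg₂ (· ++ ·) (if_congr (by omega) rfl rfl) (if_congr (by omega) rfl rfl)

theorem pv_suffixLens : pvSuffixLens = [2, 6] := by decide

-- splitting on ": " (maxsplit 1) yields a piece at index 1 exactly when ": " occurs
theorem pv_go_zero (sep : List Char) (fuel : Nat) (l cur : List Char) (acc : List (List Char)) :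
    PySem.Chars.splitOnMax.go sep fuel 0 l cur acc = ((cur.reverse ++ l) :: acc).reverse := by
  cases fuel with
  | zero => rw [PySem.Chars.splitOnMax.go.eq_def]
  | succ f =>
    cases l with
    | nil => rw [PySem.Chars.splitOnMax.go.eq_def]; simp
    | cons c rest => rw [PySem.Chars.splitOnMax.go.eq_def]; simp

theorem pv_go_two : ∀ (fuel : Nat) (l cur : List Char) (acc : List (List Char)),
    l.length < fuel → ([':', ' '] <:+: l) →
    (PySem.Chars.splitOnMax.go [':', ' '] fuel 1 l cur acc).length = acc.length + 2 := by
  intro fuel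
  induction fuel with
  | zero => intro l cur acc h; omega
  | succ f ih =>
    intro l cur acc hlen hinf
    cases l with
    | nil =>
      have := hinf.length_le; simp at this
    | cons c rest =>
      rw [PySem.Chars.splitOnMax.go.eq_def]
      simp only
      by_cases hp : List.isPrefixOf [':', ' '] (c :: rest) = true
      · rw [if_neg (by omega)]
        simp only [hp, if_true]
        rw [pv_go_zero]
        simp
      · rw [if_neg (by omega)]
        simp only [hp]
        have hinf' : [':', ' '] <:+: rest := by
          rcases List.infix_cons_iff.mp hinf with h | h
          · exact absurd (List.isPrefixOf_iff_prefix.mpr h) hp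
          · exact h
        have := ih rest (c :: cur) acc (by simp at hlen ⊢; omega) hinf'
        simpa using this

theorem pv_split_colon (l : String) (h : PySem.Str.isIn ": " l = true) :
    ∃ nl, PySem.List.pyGet? ((PySem.Str.splitMax? l ": " 1).getD []) 1 = some nl := by
  have hinf : [':', ' '] <:+: l.toList := by
    have := (PySem.Str.isIn_iff_infix ": " l).mp h
    simpa using this
  have hlen2 : (PySem.Chars.splitOnMax l.toList [':', ' '] 1).length = 2 := by
    rw [PySem.Chars.splitOnMax]
    rw [if_neg (by omega)]
    simpa using pv_go_two (l.toList.length + 1) l.toList [] [] (by omega) hinf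
  have hmap := PySem.Str.splitMax?_map l ": " 1
  rcases hx : PySem.Str.splitMax? l ": " 1 with _ | xs
  · rw [hx] at hmap
    simp [PySem.Chars.splitMax?] at hmap
  · rw [hx] at hmap
    have : (": ":String).toList = [':', ' '] := by decide
    rw [this] at hmap
    simp only [Option.map_some, PySem.Chars.splitMax?] at hmap
    rw [if_neg (by decide)] at hmap
    have hxs : xs.length = 2 := by
      have := congrArg (fun o => (o.getD []).length) hmap
      simpa [hlen2] using this
    have h1 : (1 : Int) = ((1 : Nat) : Int) := by norm_num
    rw [Option.getD_some, h1, PySem.List.pyGet?_natCast]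
    exact ⟨xs[1]'(by omega), List.getElem?_eq_getElem (by omega)⟩

-- the outer loop of A is a first-index search
theorem pv_aLoop_eq (all : List String) : ∀ (rest : List String) (i : Nat),
    pvALoop all i rest =
      (match rest.findIdx? (fun line => PySem.Str.isIn "SHIPPER CONSIGNEE" line) with
       | none => ("N/A", "N/A")
       | some j => pvABody all (i + j)) := by
  intro rest
  induction rest with
  | nil => intro i; simp [pvALoop]
  | cons line rest ih =>
    intro i
    rw [pvALoop, List.findIdx?_cons]
    by_cases hp : PySem.Str.isIn "SHIPPER CONSIGNEE" line = true
    · simp only [hp]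
      simp
    · simp only [Bool.not_eq_true] at hp
      simp only [hp, Bool.false_eq_true, if_false, ih (i+1)]
      rcases rest.findIdx? (fun line => PySem.Str.isIn "SHIPPER CONSIGNEE" line) with _ | j
      · simp
      · simp only [Option.map_some]
        congr 1
        omega

-- the two bodies agree once next_line is extracted
theorem pv_body_eq (next_line : String) :
    ((fun X : String × String => (PySem.Str.strip X.1, PySem.Str.strip X.2))
      (let parts := PySem.Str.split₀ next_line
       let sc := (pvAInner parts parts.length).getD ("N/A", "N/A")
       if sc.2 == "N/A" then (next_line, sc.2) else sc)) =
    (let parts := PySem.Str.split₀ next_line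
     match pvBScan parts pvSuffixLens with
     | some r => r
     | none => (PySem.Str.strip next_line, "N/A")) := by
  have hNA : PySem.Str.strip "N/A" = "N/A" := by decide
  simp only [pv_suffixLens]
  set parts := PySem.Str.split₀ next_line with hparts
  have hA : pvAInner parts parts.length =
      List.findSome? (pvF parts) ((if 2 ≤ parts.length then [2] else []) ++ (if 6 ≤ parts.length then [6] else [])) := by
    have h0 := pv_aInner_eq parts parts.length le_rfl
    rw [Nat.sub_self] at h0
    rw [h0]
    rw [pv_findSome?_filter (pvF parts) (fun n => n == 2 || n == 6)]
    · rw [pv_filter_range']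
    · intro n hn hpn
      have hmem := List.mem_range'_1.mp hn
      simp only [pvF]
      by_cases hc : PySem.Set.contains pvBaseNames (PySem.Str.join " " (parts.drop (parts.length - n))) = true
      · rcases pv_match_len next_line n (by omega) (by simp only [← hparts]; omega) (by rw [← hparts]; exact hc) with h | h <;>
          simp [h] at hpn
      · rw [if_neg (by simpa using hc)]
  by_cases h2l : 2 ≤ parts.length
  · by_cases hc2 : PySem.Set.contains pvBaseNames (PySem.Str.join " " (parts.drop (parts.length - 2))) = true
    · -- shortest suffix (2 tokens) matches in both
      have hf2 : pvF parts 2 = some (PySem.Str.join " " (parts.take (parts.length - 2)),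
          PySem.Str.join " " (parts.drop (parts.length - 2))) := by
        simp only [pvF]
        rw [if_pos hc2]
      have hbase := pv_strip_base _ hc2
      simp only [hA, if_pos h2l, List.cons_append, List.findSome?_cons, hf2]
      simp only [pvBScan]
      rw [if_pos h2l, if_pos hc2]
      simp [hbase.1, hbase.2]
    · have hf2 : pvF parts 2 = none := by
        simp only [pvF]
        rw [if_neg hc2]
      by_cases h6l : 6 ≤ parts.length
      · by_cases hc6 : PySem.Set.contains pvBaseNames (PySem.Str.join " " (parts.drop (parts.length - 6))) = true
        · have hf6 : pvF parts 6 = some (PySem.Str.join " " (parts.take (parts.length - 6)),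
              PySem.Str.join " " (parts.drop (parts.length - 6))) := by
            simp only [pvF]
            rw [if_pos hc6]
          have hbase := pv_strip_base _ hc6
          simp only [hA, if_pos h2l, if_pos h6l, List.cons_append, List.findSome?_cons, hf2]
          simp only [pvBScan]
          rw [if_pos h2l, if_neg hc2, if_pos h6l, if_pos hc6]
          simp [hf6, hbase.1, hbase.2]
        · have hf6 : pvF parts 6 = none := by
            simp only [pvF]
            rw [if_neg hc6]
          simp only [hA, if_pos h2l, if_pos h6l, List.cons_append, List.findSome?_cons, hf2]
          simp only [pvBScan]
          rw [if_pos h2l, if_neg hc2, if_pos h6l, if_neg hc6]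
          simp [hf6, hNA]
      · have h6l2 : ¬ (6 ≤ parts.length) := h6l
        simp only [hA, if_pos h2l, if_neg h6l2, List.cons_append, List.findSome?_cons, hf2]
        simp only [pvBScan]
        rw [if_pos h2l, if_neg hc2, if_neg h6l2]
        simp [hNA]
  · have h6l : ¬ (6 ≤ parts.length) := by omega
    simp only [hA, if_neg h2l, if_neg h6l]
    simp only [pvBScan]
    rw [if_neg h2l, if_neg h6l]
    simp [hNA]

-- ===== VERDICT (by name: the statement is the Claim_ definition above) =====
theorem extract_shipper_and_consignee_spec : Claim_equal_extract_shipper_and_consignee := by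
  intro lines _ hpre
  unfold Spec_extract_shipper_and_consignee
  unfold extract_shipper_and_consignee extract_shipper_and_consignee_alt
  rw [pv_aLoop_eq lines lines 0]
  unfold Pre_extract_shipper_and_consignee at hpre
  rcases hidx : lines.findIdx? (fun line => PySem.Str.isIn "SHIPPER CONSIGNEE" line) with _ | j
  · show (PySem.Str.strip "N/A", PySem.Str.strip "N/A") = ("N/A", "N/A")
    decide
  · have hpre2 : (match lines[j+1]? with
        | none => true
        | some l => PySem.Str.isIn ": " l) = true := by
      rw [hidx] at hpre; exact hpre
    simp only [Nat.zero_add]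
    by_cases hlt : j + 1 < lines.length
    · rcases hget : lines[j+1]? with _ | l
      · rw [List.getElem?_eq_none_iff] at hget; omega
      · rw [hget] at hpre2
        have hcolon : PySem.Str.isIn ": " l = true := hpre2
        have hgetD : lines.getD (j+1) "" = l := by
          rw [List.getD_eq_getElem?_getD, hget, Option.getD_some]
        rcases pv_split_colon l hcolon with ⟨nl, hnl⟩
        simp only [pvABody, if_pos hlt, if_neg (by omega : ¬ j + 1 ≥ lines.length), hgetD, hnl]
        exact pv_body_eq nl
    · simp only [pvABody, if_neg hlt, if_pos (by omega : j + 1 ≥ lines.length)]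
      show (PySem.Str.strip "N/A", PySem.Str.strip "N/A") = ("N/A", "N/A")
      decide
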